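-- pv_equiv track=rewrite | github.com/runderlap/aoc2020 | 10/pathcounter.py | getHighestPath
-- ===== SOURCE A (Python) =====
-- def getHighestPath(numberOfNodes):
--     if numberOfNodes<4:
--         return str(numberOfNodes)
--     totalValue=0
--     chain = []
--     while totalValue<numberOfNodes:
--         if numberOfNodes-totalValue<4:
--             chain.append(str(numberOfNodes-totalValue))
--             totalValue += numberOfNodes-totalValue
--         else:
--             chain.append(str(3))
--             totalValue += 3
--     return ''.join(chain)
-- ===== SOURCE B (Python) =====
-- def getHighestPath(numberOfNodes):
--     if numberOfNodes < 4:
--         return str(numberOfNodes)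
--     q, r = divmod(numberOfNodes, 3)
--     return '3' * q + (str(r) if r else '')
-- ===== Notes on version B (the rewrite author's own statement) =====
-- stated objective: simpler
-- what changed: Replaced the accumulating while-loop over a running total with a closed-form divmod: '3' repeated n//3 times plus the remainder digit when n%3 != 0.
import Mathlib
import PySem

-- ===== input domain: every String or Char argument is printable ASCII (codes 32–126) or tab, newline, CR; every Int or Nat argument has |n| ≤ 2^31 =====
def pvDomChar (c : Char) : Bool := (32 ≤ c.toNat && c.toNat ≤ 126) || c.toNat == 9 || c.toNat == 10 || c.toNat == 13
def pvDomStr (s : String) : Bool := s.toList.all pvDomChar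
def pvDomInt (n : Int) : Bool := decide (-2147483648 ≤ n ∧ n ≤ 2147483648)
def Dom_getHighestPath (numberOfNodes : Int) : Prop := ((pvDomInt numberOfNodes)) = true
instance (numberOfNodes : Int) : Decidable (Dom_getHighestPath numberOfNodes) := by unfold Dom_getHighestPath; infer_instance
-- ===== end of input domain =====

-- B replaces A's accumulating while-loop with a closed-form divmod ('3' repeated n//3 times plus the
-- optional remainder digit); objective: simpler.

-- ===== PORT A =====
-- the while-loop: state (totalValue, chain), recursion on the remaining distance numberOfNodes - totalValue
def getHighestPathLoop (numberOfNodes totalValue : Int) (chain : List String) : List String :=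
  if totalValue < numberOfNodes then
    if numberOfNodes - totalValue < 4 then
      getHighestPathLoop numberOfNodes (totalValue + (numberOfNodes - totalValue))
        (chain ++ [PySem.Int.toStr (numberOfNodes - totalValue)])
    else
      getHighestPathLoop numberOfNodes (totalValue + 3) (chain ++ [PySem.Int.toStr 3])
  else chain
termination_by (numberOfNodes - totalValue).toNat
decreasing_by all_goals omega

def getHighestPath (numberOfNodes : Int) : String :=
  if numberOfNodes < 4 then PySem.Int.toStr numberOfNodes
  else PySem.Str.join "" (getHighestPathLoop numberOfNodes 0 [])

-- ===== PORT B =====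
-- '3' * q  (Python str * int: k copies, empty for k ≤ 0) — exact, no PySem primitive exists for str*int
def pyStrMul (s : String) (k : Int) : String := PySem.Str.join "" (List.replicate k.toNat s)

def getHighestPath_alt (numberOfNodes : Int) : String :=
  if numberOfNodes < 4 then PySem.Int.toStr numberOfNodes
  else
    let q := PySem.Int.floordiv numberOfNodes 3
    let r := PySem.Int.mod numberOfNodes 3
    pyStrMul "3" q ++ (if r ≠ 0 then PySem.Int.toStr r else "")

-- ===== PRECONDITION & SPEC =====
def Spec_getHighestPath (numberOfNodes : Int) (out : String) : Prop := out = getHighestPath_alt numberOfNodes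
instance (numberOfNodes : Int) (out : String) : Decidable (Spec_getHighestPath numberOfNodes out) := by unfold Spec_getHighestPath; infer_instance

-- ===== CLAIM (what is proved, stated in full; the proofs are below) =====
def Claim_equal_getHighestPath : Prop := ∀ (numberOfNodes : Int), Dom_getHighestPath numberOfNodes → Spec_getHighestPath numberOfNodes (getHighestPath numberOfNodes)

-- ===== LEMMAS AND PROOFS =====

theorem intercalate_nil_eq_flatten (parts : List (List Char)) :
    [].intercalate parts = parts.flatten := by
  induction parts with
  | nil => rfl
  | cons a l ih => cases l <;> simp_all [List.intercalate, List.intersperse]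

theorem join_empty_cons (x : String) (l : List String) :
    PySem.Str.join "" (x :: l) = x ++ PySem.Str.join "" l := by
  simp [PySem.Str.join, PySem.Chars.join, intercalate_nil_eq_flatten,
    String.ofList_append, String.ofList_toList]

-- accumulator lemma for A's loop
theorem getHighestPathLoop_acc_aux (k : Nat) :
    ∀ (n t : Int) (chain : List String), (n - t).toNat = k →
    getHighestPathLoop n t chain = chain ++ getHighestPathLoop n t [] := by
  induction k using Nat.strong_induction_on with
  | _ k ih =>
    intro n t chain hk
    rw [getHighestPathLoop]
    conv_rhs => rw [getHighestPathLoop]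
    split_ifs with h1 h2
    · simp only [List.nil_append]
      rw [ih (n - (t + (n - t))).toNat (by omega) n (t + (n - t))
          (chain ++ [PySem.Int.toStr (n - t)]) rfl,
        ih (n - (t + (n - t))).toNat (by omega) n (t + (n - t))
          [PySem.Int.toStr (n - t)] rfl]
      simp
    · simp only [List.nil_append]
      rw [ih (n - (t + 3)).toNat (by omega) n (t + 3)
          (chain ++ [PySem.Int.toStr 3]) rfl,
        ih (n - (t + 3)).toNat (by omega) n (t + 3) [PySem.Int.toStr 3] rfl]
      simp
    · simp

theorem getHighestPathLoop_acc (numberOfNodes totalValue : Int) (chain : List String) :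
    getHighestPathLoop numberOfNodes totalValue chain
      = chain ++ getHighestPathLoop numberOfNodes totalValue [] :=
  getHighestPathLoop_acc_aux _ _ _ chain rfl

-- the heart: the joined chain equals the closed form in the remaining distance
theorem loop_closed_form (k : Nat) (numberOfNodes totalValue : Int)
    (hk : (numberOfNodes - totalValue).toNat = k) (hpos : 0 < numberOfNodes - totalValue) :
    PySem.Str.join "" (getHighestPathLoop numberOfNodes totalValue [])
      = pyStrMul "3" (PySem.Int.floordiv (numberOfNodes - totalValue) 3)
        ++ (if PySem.Int.mod (numberOfNodes - totalValue) 3 ≠ 0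
            then PySem.Int.toStr (PySem.Int.mod (numberOfNodes - totalValue) 3) else "") := by
  induction k using Nat.strong_induction_on generalizing numberOfNodes totalValue with
  | _ k ih =>
    set n := numberOfNodes with hn
    set t := totalValue with ht
    by_cases hsm : n - t < 4
    · -- final step: one element str(n - t), n - t ∈ {1, 2, 3}
      rw [getHighestPathLoop, if_pos (by omega), if_pos hsm, getHighestPathLoop_acc]
      have hEnd : t + (n - t) = n := by ring
      rw [hEnd, getHighestPathLoop, if_neg (by omega)]
      have h123 : n - t = 1 ∨ n - t = 2 ∨ n - t = 3 := by omega
      rcases h123 with h | h | h <;> rw [h] <;> decide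
    · -- append "3", recurse with totalValue + 3
      rw [getHighestPathLoop, if_pos (by omega), if_neg hsm, getHighestPathLoop_acc]
      simp only [List.nil_append, List.singleton_append]
      rw [join_empty_cons]
      have hrec := ih (n - (t + 3)).toNat (by omega) n (t + 3) rfl (by omega)
      rw [hrec]
      have hm3 : n - (t + 3) = (n - t) - 3 := by ring
      have hq : PySem.Int.floordiv (n - t) 3 = PySem.Int.floordiv ((n - t) - 3) 3 + 1 := by
        rw [PySem.Int.floordiv_eq_ediv_of_pos (by omega), PySem.Int.floordiv_eq_ediv_of_pos (by omega)]
        omega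
      have hr : PySem.Int.mod (n - t) 3 = PySem.Int.mod ((n - t) - 3) 3 := by
        rw [PySem.Int.mod_eq_emod_of_pos (by omega), PySem.Int.mod_eq_emod_of_pos (by omega)]
        omega
      have hq0 : 0 ≤ PySem.Int.floordiv ((n - t) - 3) 3 := by
        rw [PySem.Int.floordiv_eq_ediv_of_pos (by omega)]
        omega
      have hmul : pyStrMul "3" (PySem.Int.floordiv ((n - t) - 3) 3 + 1)
          = "3" ++ pyStrMul "3" (PySem.Int.floordiv ((n - t) - 3) 3) := by
        unfold pyStrMul
        rw [show (PySem.Int.floordiv ((n - t) - 3) 3 + 1).toNat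
            = (PySem.Int.floordiv ((n - t) - 3) 3).toNat + 1 from by omega,
          List.replicate_succ, join_empty_cons]
      rw [hm3, hq, hr, hmul, String.append_assoc,
        show PySem.Int.toStr 3 = "3" from by decide]

-- ===== VERDICT (by name: the statement is the Claim_ definition above) =====
theorem getHighestPath_spec : Claim_equal_getHighestPath := by
  intro n _
  unfold Spec_getHighestPath getHighestPath getHighestPath_alt
  by_cases h : n < 4
  · simp [h]
  · simp only [h, if_false]
    have := loop_closed_form (n - 0).toNat n 0 rfl (by omega)
    simpa using this
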